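-- pv_equiv track=rewrite | github.com/Domz4/aoc2024 | day7/app.py | find_valid_combinations
-- ===== SOURCE A (Python) =====
-- def evaluate_expression(numbers, operators):
--     res = numbers[0]
--     for i, op in enumerate(operators):
--         if op == "+":
--             res += numbers[i + 1]
--         else:
--             res *= numbers[i + 1]
--     return res
--
-- def find_valid_combinations(target, numbers):
--     if len(numbers) == 1:
--         return target == numbers[0]
--
--     # we need n-1 operators
--     num_operators_needed = len(numbers) - 1
--
--     # Try all possible combinations of + and *
--     for i in range(2**num_operators_needed):
--         operators = []
--         for j in range(num_operators_needed):
--             if (i >> j) & 1: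
--                 operators.append("+")
--             else:
--                 operators.append("*")
--
--         res = evaluate_expression(numbers, operators)
--         if res == target:
--             return True
--
--     return False
-- ===== SOURCE B (Python) =====
-- def find_valid_combinations(target, numbers):
--     # Reachable-value set DP: one left-to-right pass maintaining the set of
--     # all values obtainable from the prefix; duplicates collapse.
--     reachable = {numbers[0]}
--     for n in numbers[1:]:
--         reachable = {v + n for v in reachable} | {v * n for v in reachable}
--     return target in reachable
-- ===== Notes on version B (the rewrite author's own statement) =====
-- stated objective: alternative
-- what changed: replaces enumeration of all 2^(n-1) operator bitmasks with full re-evaluation per mask by a single left-to-right pass maintaining the set of reachable prefix values (prefix sharing plus duplicate collapsing).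
import Mathlib
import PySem

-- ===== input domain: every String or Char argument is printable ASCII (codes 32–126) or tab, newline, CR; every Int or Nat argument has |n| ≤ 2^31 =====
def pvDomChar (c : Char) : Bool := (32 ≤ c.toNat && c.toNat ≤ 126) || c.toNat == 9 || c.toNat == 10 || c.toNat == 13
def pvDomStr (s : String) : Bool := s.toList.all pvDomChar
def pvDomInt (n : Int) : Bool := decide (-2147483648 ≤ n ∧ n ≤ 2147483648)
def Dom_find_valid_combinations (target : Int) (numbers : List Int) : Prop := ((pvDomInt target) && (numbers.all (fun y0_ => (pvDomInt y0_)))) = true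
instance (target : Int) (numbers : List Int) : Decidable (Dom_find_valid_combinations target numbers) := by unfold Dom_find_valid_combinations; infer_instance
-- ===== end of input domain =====

-- B replaces A's enumeration of all operator bitmasks (re-evaluating each full
-- expression) by one pass maintaining the set of reachable prefix values.


-- ===== PORT A =====
-- 'res = numbers[0]; for i, op in enumerate(operators): …'  (indices are in
-- range whenever operators has numbers.length - 1 elements, as A guarantees)
def evaluate_expression (numbers : List Int) (operators : List String) : Int :=
  (PySem.List.enumerate operators 0).foldl
    (fun res p =>
      if p.2 = "+" then res + PySem.List.pyGetD numbers (p.1 + 1) 0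
      else res * PySem.List.pyGetD numbers (p.1 + 1) 0)
    (PySem.List.pyGetD numbers 0 0)

-- outer loop 'for i in range(2**k)' and inner 'for j in range(k)' run over
-- nonnegative ints only, so List.range over Nat is exact here
def find_valid_combinations (target : Int) (numbers : List Int) : Bool :=
  if numbers.length = 1 then target == PySem.List.pyGetD numbers 0 0
  else
    let k : Nat := numbers.length - 1
    (List.range (2 ^ k)).any (fun i =>
      let operators := (List.range k).foldl
        (fun ops j => ops ++ [if (i >>> j) &&& 1 = 1 then "+" else "*"]) []
      evaluate_expression numbers operators == target)

-- ===== PORT B =====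
-- 'reachable = {numbers[0]}; for n in numbers[1:]: reachable = {v+n for v in reachable} | {v*n for v in reachable}; return target in reachable'
-- (set-comprehension results and the final membership test are independent of
-- Python's set iteration order)
def find_valid_combinations_alt (target : Int) (numbers : List Int) : Bool :=
  match numbers with
  | [] => false   -- unreachable under Pre_ (the Python raises IndexError)
  | x :: rest =>
    let reach : PySem.Set Int := rest.foldl
      (fun (s : PySem.Set Int) n =>
        PySem.Set.union (PySem.Set.ofList (s.map (· + n))) (s.map (· * n)))
      (PySem.Set.ofList [x])
    PySem.Set.contains reach target

-- ===== PRECONDITION & SPEC =====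
-- A raises (TypeError via range(2**-1)) on the empty list; B raises IndexError.
def Pre_find_valid_combinations (target : Int) (numbers : List Int) : Prop := numbers ≠ []
instance (target : Int) (numbers : List Int) : Decidable (Pre_find_valid_combinations target numbers) := by unfold Pre_find_valid_combinations; infer_instance
def pvWitness_find_valid_combinations : Int × List Int := (3, [1, 2])
def Spec_find_valid_combinations (target : Int) (numbers : List Int) (out : Bool) : Prop := out = find_valid_combinations_alt target numbers
instance (target : Int) (numbers : List Int) (out : Bool) : Decidable (Spec_find_valid_combinations target numbers out) := by unfold Spec_find_valid_combinations; infer_instance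

-- ===== CLAIM (what is proved, stated in full; the proofs are below) =====
def Claim_equal_find_valid_combinations : Prop := ∀ (target : Int) (numbers : List Int), Dom_find_valid_combinations target numbers → Pre_find_valid_combinations target numbers → Spec_find_valid_combinations target numbers (find_valid_combinations target numbers)

-- ===== LEMMAS AND PROOFS =====

-- reference semantics: all values reachable from seed x over list l with + / *
def reachVals (x : Int) (l : List Int) : List Int :=
  match l with
  | [] => [x]
  | n :: l => reachVals (x + n) l ++ reachVals (x * n) l

-- evaluation of the bitmask i (bit = 1 ↦ +, bit = 0 ↦ *), consuming bits LSB first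
def evalBits (x : Int) (l : List Int) (i : Nat) : Int :=
  match l with
  | [] => x
  | n :: l => evalBits (if i % 2 = 1 then x + n else x * n) l (i / 2)

-- evaluation with an explicit operator list, in lockstep with the numbers
def evalOps (res : Int) (l : List Int) (ops : List String) : Int :=
  match l, ops with
  | n :: l, op :: ops => evalOps (if op = "+" then res + n else res * n) l ops
  | _, _ => res

theorem foldl_append_singleton {α β : Type} (f : α → β) :
    ∀ (l : List α) (init : List β),
      l.foldl (fun acc x => acc ++ [f x]) init = init ++ l.map f := by
  intro l
  induction l with
  | nil => simp
  | cons x l ih => intro init; simp [List.foldl_cons, ih]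

theorem evaluate_eq_evalOps :
    ∀ (ops : List String) (numbers : List Int) (s : Nat) (res : Int),
      ops.length + s + 1 ≤ numbers.length →
      (PySem.List.enumerate ops (s : Int)).foldl
        (fun r p =>
          if p.2 = "+" then r + PySem.List.pyGetD numbers (p.1 + 1) 0
          else r * PySem.List.pyGetD numbers (p.1 + 1) 0) res
      = evalOps res (numbers.drop (s + 1)) ops := by
  intro ops
  induction ops with
  | nil =>
    intro numbers s res _
    simp [PySem.List.enumerate_nil, evalOps]
  | cons op ops ih =>
    intro numbers s res h
    have hs1 : s + 1 < numbers.length := by simp at h; omega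
    have hget : PySem.List.pyGetD numbers ((s : Int) + 1) 0 = numbers[s + 1] := by
      have : ((s : Int) + 1) = ((s + 1 : Nat) : Int) := by push_cast; ring
      rw [this, PySem.List.pyGetD_natCast]
      simp [hs1]
    have hdrop : numbers.drop (s + 1) = numbers[s + 1] :: numbers.drop (s + 2) :=
      List.drop_eq_getElem_cons hs1
    rw [PySem.List.enumerate_cons, List.foldl_cons, hdrop]
    have hlen : ops.length + (s + 1) + 1 ≤ numbers.length := by simp at h ⊢; omega
    have hih := ih numbers (s + 1)
      (if op = "+" then res + numbers[s + 1] else res * numbers[s + 1]) hlen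
    push_cast at hih
    simp only [evalOps, hget, show s + 1 + 1 = s + 2 from rfl] at hih ⊢
    by_cases hop : op = "+" <;> simp only [hop, if_pos, reduceIte] at hih ⊢ <;>
      simpa using hih

theorem evalOps_bits :
    ∀ (l : List Int) (x : Int) (i : Nat),
      evalOps x l ((List.range l.length).map
        (fun j => if (i >>> j) &&& 1 = 1 then "+" else "*")) = evalBits x l i := by
  intro l
  induction l with
  | nil => intro x i; rfl
  | cons n l ih =>
    intro x i
    rw [List.length_cons, List.range_succ_eq_map]
    simp only [List.map_cons, List.map_map]
    have h0 : (i >>> 0) &&& 1 = i % 2 := by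
      simp [Nat.and_one_is_mod]
    have hsucc : ∀ j : Nat, i >>> (j + 1) = (i / 2) >>> j := by
      intro j
      rw [show j + 1 = 1 + j by omega, Nat.shiftRight_add]
      simp [Nat.shiftRight_one]
    have hmapeq : (List.range l.length).map
        ((fun j => if (i >>> j) &&& 1 = 1 then "+" else "*") ∘ Nat.succ)
        = (List.range l.length).map
        (fun j => if ((i / 2) >>> j) &&& 1 = 1 then "+" else "*") := by
      apply List.map_congr_left
      intro j _
      simp [Function.comp, hsucc j]
    rw [hmapeq]
    have ih' : ∀ y, evalOps y l ((List.range l.length).map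
        (fun j => if ((i / 2) >>> j) &&& 1 = 1 then "+" else "*")) = evalBits y l (i / 2) :=
      fun y => ih y (i / 2)
    simp only [Nat.and_one_is_mod] at ih' ⊢
    by_cases hb : i % 2 = 1 <;> simp [evalOps, evalBits, hb, ih']

theorem bits_iff_reach :
    ∀ (l : List Int) (x t : Int),
      (∃ i < 2 ^ l.length, evalBits x l i = t) ↔ t ∈ reachVals x l := by
  intro l
  induction l with
  | nil =>
    intro x t
    constructor
    · rintro ⟨i, _, h⟩; simp [evalBits] at h; simp [reachVals, h]
    · intro h; simp [reachVals] at h; exact ⟨0, by norm_num, by simp [evalBits, h]⟩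
  | cons n l ih =>
    intro x t
    simp only [reachVals, List.mem_append]
    constructor
    · rintro ⟨i, hi, h⟩
      have hdiv : i / 2 < 2 ^ l.length := by
        simp [List.length_cons, pow_succ] at hi; omega
      by_cases hb : i % 2 = 1
      · left; exact (ih (x + n) t).1 ⟨i / 2, hdiv, by simpa [evalBits, hb] using h⟩
      · right; exact (ih (x * n) t).1 ⟨i / 2, hdiv, by simpa [evalBits, hb] using h⟩
    · rintro (h | h)
      · obtain ⟨i, hi, h⟩ := (ih (x + n) t).2 h
        refine ⟨2 * i + 1, ?_, ?_⟩
        · simp [List.length_cons, pow_succ]; omega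
        · have h1 : (2 * i + 1) % 2 = 1 := by omega
          have h2 : (2 * i + 1) / 2 = i := by omega
          simp [evalBits, h2, h]
      · obtain ⟨i, hi, h⟩ := (ih (x * n) t).2 h
        refine ⟨2 * i, ?_, ?_⟩
        · simp [List.length_cons, pow_succ]; omega
        · have h1 : (2 * i) % 2 ≠ 1 := by omega
          have h2 : (2 * i) / 2 = i := by omega
          simp [evalBits, h2, h]

-- one DP step of B, membership characterisation
theorem mem_step (s : PySem.Set Int) (n t : Int) :
    t ∈ PySem.Set.union (PySem.Set.ofList (s.map (· + n))) (s.map (· * n))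
      ↔ ∃ v ∈ s, t = v + n ∨ t = v * n := by
  simp only [PySem.Set.mem_union, PySem.Set.mem_ofList, List.mem_map]
  constructor
  · rintro (⟨v, hv, rfl⟩ | ⟨v, hv, rfl⟩)
    · exact ⟨v, hv, Or.inl rfl⟩
    · exact ⟨v, hv, Or.inr rfl⟩
  · rintro ⟨v, hv, rfl | rfl⟩
    · exact Or.inl ⟨v, hv, rfl⟩
    · exact Or.inr ⟨v, hv, rfl⟩

theorem foldl_step_mem :
    ∀ (l : List Int) (s : PySem.Set Int) (t : Int),
      (t ∈ l.foldl
        (fun (s : PySem.Set Int) n =>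
          PySem.Set.union (PySem.Set.ofList (s.map (· + n))) (s.map (· * n))) s)
      ↔ ∃ v ∈ s, t ∈ reachVals v l := by
  intro l
  induction l with
  | nil => intro s t; simp [reachVals]
  | cons n l ih =>
    intro s t
    rw [List.foldl_cons, ih]
    constructor
    · rintro ⟨w, hw, hr⟩
      obtain ⟨v, hv, rfl | rfl⟩ := (mem_step s n w).1 hw
      · exact ⟨v, hv, by simp [reachVals, hr]⟩
      · exact ⟨v, hv, by simp [reachVals, hr]⟩
    · rintro ⟨v, hv, hr⟩
      simp only [reachVals, List.mem_append] at hr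
      rcases hr with h | h
      · exact ⟨v + n, (mem_step s n (v + n)).2 ⟨v, hv, Or.inl rfl⟩, h⟩
      · exact ⟨v * n, (mem_step s n (v * n)).2 ⟨v, hv, Or.inr rfl⟩, h⟩

theorem alt_iff (target x : Int) (rest : List Int) :
    find_valid_combinations_alt target (x :: rest) = true
      ↔ target ∈ reachVals x rest := by
  simp only [find_valid_combinations_alt]
  rw [show PySem.Set.contains
        (rest.foldl (fun (s : PySem.Set Int) n =>
          PySem.Set.union (PySem.Set.ofList (s.map (· + n))) (s.map (· * n)))
          (PySem.Set.ofList [x])) target = true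
      ↔ target ∈ rest.foldl (fun (s : PySem.Set Int) n =>
          PySem.Set.union (PySem.Set.ofList (s.map (· + n))) (s.map (· * n)))
          (PySem.Set.ofList [x]) from by simp [PySem.Set.contains]]
  rw [foldl_step_mem]
  constructor
  · rintro ⟨v, hv, h⟩
    rw [PySem.Set.mem_ofList] at hv
    simp at hv
    exact hv ▸ h
  · intro h
    exact ⟨x, by simp [PySem.Set.mem_ofList], h⟩

theorem a_iff (target x : Int) (rest : List Int) :
    find_valid_combinations target (x :: rest) = true
      ↔ target ∈ reachVals x rest := by
  by_cases hone : rest = []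
  · subst hone
    have h1 : find_valid_combinations target [x] = (target == PySem.List.pyGetD [x] 0 0) := rfl
    have hx : PySem.List.pyGetD [x] 0 0 = x := by simp
    rw [h1, hx, show reachVals x [] = [x] from rfl, beq_iff_eq, List.mem_singleton]
  · have hlen : (x :: rest).length ≠ 1 := by simpa using hone
    have hx0 : PySem.List.pyGetD (x :: rest) 0 0 = x := by simp
    have key : ∀ i : Nat, evaluate_expression (x :: rest)
        ((List.range rest.length).map (fun j => if (i >>> j) &&& 1 = 1 then "+" else "*"))
        = evalBits x rest i := by
      intro i
      have he := evaluate_eq_evalOps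
        ((List.range rest.length).map (fun j => if (i >>> j) &&& 1 = 1 then "+" else "*"))
        (x :: rest) 0 (PySem.List.pyGetD (x :: rest) 0 0) (by simp)
      simp only [Nat.cast_zero] at he
      rw [evaluate_expression, he, hx0, show (0 : Nat) + 1 = 1 from rfl,
        show (x :: rest).drop 1 = rest from rfl, evalOps_bits]
    have hc : ¬(rest.length + 1 = 1) := by simpa using hone
    simp only [find_valid_combinations, List.length_cons, Nat.add_sub_cancel, if_neg hc]
    rw [List.any_eq_true]
    constructor
    · rintro ⟨i, hi, h⟩
      rw [List.mem_range] at hi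
      rw [foldl_append_singleton] at h
      simp only [List.nil_append, beq_iff_eq] at h
      rw [key i] at h
      exact (bits_iff_reach rest x target).1 ⟨i, hi, h⟩
    · intro h
      obtain ⟨i, hi, hv⟩ := (bits_iff_reach rest x target).2 h
      refine ⟨i, List.mem_range.mpr hi, ?_⟩
      rw [foldl_append_singleton]
      simp only [List.nil_append, beq_iff_eq]
      rw [key i]
      exact hv

-- ===== VERDICT (by name: the statement is the Claim_ definition above) =====
theorem find_valid_combinations_spec : Claim_equal_find_valid_combinations := by
  intro target numbers _ hpre
  unfold Spec_find_valid_combinations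
  cases numbers with
  | nil => exact absurd rfl hpre
  | cons x rest =>
    have := (a_iff target x rest).trans (alt_iff target x rest).symm
    exact Bool.eq_iff_iff.mpr this
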